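-- pv_equiv track=rewrite | github.com/sawyerrice/Path-Finding-Agent | agent_A.py | nearCar
-- ===== SOURCE A (Python) =====
-- def nearCar(cur_position, cur_car_positions):
--
--     x = cur_position[0]
--     y = cur_position[1]
--     for i in range(-2,3,1):
--         for j in range(-2,3,1):
--             if((x+i,y+j) in cur_car_positions):
--                 return 1
--     return 0
-- ===== SOURCE B (Python) =====
-- def nearCar(cur_position, cur_car_positions):
--     x = cur_position[0]
--     y = cur_position[1]
--     for car in cur_car_positions:
--         cx = car[0]
--         cy = car[1]
--         if abs(cx - x) <= 2 and abs(cy - y) <= 2: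
--             return 1
--     return 0
-- ===== Notes on version B (the rewrite author's own statement) =====
-- stated objective: alternative
-- what changed: B iterates once over the car list testing Chebyshev distance <= 2 with early exit, instead of scanning the 25 cells of the 5x5 neighborhood and doing a list-membership scan of the car list for each cell.
import Mathlib
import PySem

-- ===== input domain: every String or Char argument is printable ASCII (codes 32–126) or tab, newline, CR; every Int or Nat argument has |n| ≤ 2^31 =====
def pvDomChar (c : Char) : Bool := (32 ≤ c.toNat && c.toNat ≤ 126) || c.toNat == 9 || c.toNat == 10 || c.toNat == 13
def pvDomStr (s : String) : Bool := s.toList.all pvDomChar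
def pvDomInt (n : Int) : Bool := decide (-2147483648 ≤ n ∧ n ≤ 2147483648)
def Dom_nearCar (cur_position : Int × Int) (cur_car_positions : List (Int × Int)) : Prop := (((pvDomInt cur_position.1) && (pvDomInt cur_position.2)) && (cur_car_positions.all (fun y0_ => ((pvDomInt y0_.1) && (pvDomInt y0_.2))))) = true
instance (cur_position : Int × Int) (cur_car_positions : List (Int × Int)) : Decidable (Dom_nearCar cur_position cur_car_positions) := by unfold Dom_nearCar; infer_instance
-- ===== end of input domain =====

-- B replaces A's 25-cell neighborhood scan (a list-membership test per cell) by a single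
-- pass over the car list testing Chebyshev distance <= 2 (alternative decomposition).
-- ===== PORT A =====
def nearCar (cur_position : Int × Int) (cur_car_positions : List (Int × Int)) : Int :=
  let x := cur_position.1
  let y := cur_position.2
  -- the nested for-loops with early 'return 1' are the any-of-any of the membership test
  if (PySem.List.pyRange (-2) 3 1).any (fun i =>
       (PySem.List.pyRange (-2) 3 1).any (fun j =>
         cur_car_positions.contains (x + i, y + j)))
  then 1 else 0

-- ===== PORT B =====
-- the for-loop over cars with early 'return 1'
def nearCarAltLoop (x y : Int) : List (Int × Int) → Int
  | [] => 0
  | car :: rest =>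
    if (car.1 - x).natAbs ≤ 2 ∧ (car.2 - y).natAbs ≤ 2 then 1
    else nearCarAltLoop x y rest

def nearCar_alt (cur_position : Int × Int) (cur_car_positions : List (Int × Int)) : Int :=
  nearCarAltLoop cur_position.1 cur_position.2 cur_car_positions

-- ===== PRECONDITION & SPEC =====
def Spec_nearCar (cur_position : Int × Int) (cur_car_positions : List (Int × Int)) (out : Int) : Prop := out = nearCar_alt cur_position cur_car_positions
instance (cur_position : Int × Int) (cur_car_positions : List (Int × Int)) (out : Int) : Decidable (Spec_nearCar cur_position cur_car_positions out) := by unfold Spec_nearCar; infer_instance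

-- ===== CLAIM (what is proved, stated in full; the proofs are below) =====
def Claim_equal_nearCar : Prop := ∀ (cur_position : Int × Int) (cur_car_positions : List (Int × Int)), Dom_nearCar cur_position cur_car_positions → Spec_nearCar cur_position cur_car_positions (nearCar cur_position cur_car_positions)

-- ===== LEMMAS AND PROOFS =====

-- ===== VERDICT (by name: the statement is the Claim_ definition above) =====
lemma altLoop_eq (x y : Int) (cars : List (Int × Int)) :
    nearCarAltLoop x y cars =
      if cars.any (fun c => decide ((c.1 - x).natAbs ≤ 2 ∧ (c.2 - y).natAbs ≤ 2)) then 1 else 0 := by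
  induction cars with
  | nil => simp [nearCarAltLoop]
  | cons c rest ih =>
    by_cases h : (c.1 - x).natAbs ≤ 2 ∧ (c.2 - y).natAbs ≤ 2
    · simp [nearCarAltLoop, h]
    · simp only [nearCarAltLoop, if_neg h, ih, List.any_cons, decide_eq_false h, Bool.false_or]

lemma cond_eq (x y : Int) (cars : List (Int × Int)) :
    ((PySem.List.pyRange (-2) 3 1).any (fun i =>
       (PySem.List.pyRange (-2) 3 1).any (fun j =>
         cars.contains (x + i, y + j))))
    = cars.any (fun c => decide ((c.1 - x).natAbs ≤ 2 ∧ (c.2 - y).natAbs ≤ 2)) := by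
  have hr : PySem.List.pyRange (-2) 3 1 = [-2, -1, 0, 1, 2] := by decide
  rw [hr]
  rcases Bool.eq_false_or_eq_true (cars.any (fun c => decide ((c.1 - x).natAbs ≤ 2 ∧ (c.2 - y).natAbs ≤ 2))) with h | h
  · rw [h]
    simp only [List.any_eq_true, decide_eq_true_eq] at h
    obtain ⟨c, hc, h1, h2⟩ := h
    have hmem : (x + (c.1 - x), y + (c.2 - y)) = c := by
      cases c; simp only [Prod.mk.injEq]; constructor <;> ring
    refine List.any_eq_true.mpr ⟨c.1 - x, ?_, List.any_eq_true.mpr ⟨c.2 - y, ?_, ?_⟩⟩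
    · rcases (by omega : c.1 - x = -2 ∨ c.1 - x = -1 ∨ c.1 - x = 0 ∨ c.1 - x = 1 ∨ c.1 - x = 2) with h'|h'|h'|h'|h' <;> rw [h'] <;> decide
    · rcases (by omega : c.2 - y = -2 ∨ c.2 - y = -1 ∨ c.2 - y = 0 ∨ c.2 - y = 1 ∨ c.2 - y = 2) with h'|h'|h'|h'|h' <;> rw [h'] <;> decide
    · rw [hmem]; exact List.contains_iff_mem.mpr hc
  · rw [h]
    simp only [List.any_eq_false, decide_eq_true_eq, not_and, not_le] at h
    refine List.any_eq_false.mpr ?_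
    intro i hi hct
    obtain ⟨j, hj, hcont⟩ := List.any_eq_true.mp hct
    have hmem := List.contains_iff_mem.mp hcont
    have h2 := h _ hmem
    simp only [List.mem_cons, List.not_mem_nil, or_false] at hi hj
    omega

theorem nearCar_spec : Claim_equal_nearCar := by
  intro p cars _
  unfold Spec_nearCar nearCar nearCar_alt
  dsimp only
  rw [cond_eq, altLoop_eq]
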